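-- pv_equiv track=rewrite | github.com/lromeros/wallbreakers2019 | week2/subdomain-visit-count.py | get_subdomains
-- ===== SOURCE A (Python) =====
-- def get_subdomains(d):
--     domains = d.split('.')
--     subdomains = []
--     last_elem = []
--
--     for i in range(len(domains)):
--         last_elem.insert(0, domains[len(domains) - 1 - i])
--         sd = '.'.join(last_elem) if len(last_elem) > 1 else ''.join(last_elem)
--         subdomains.append(sd)
--
--     return subdomains
-- ===== SOURCE B (Python) =====
-- def get_subdomains(d):
--     res = []
--     rest = d
--     while True:
--         res.append(rest)
--         i = rest.find('.')
--         if i == -1: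
--             break
--         rest = rest[i+1:]
--     res.reverse()
--     return res
-- ===== Notes on version B (the rewrite author's own statement) =====
-- stated objective: alternative
-- what changed: Instead of splitting into a parts list, inserting each component at the front and re-joining the whole list on every iteration, B never splits or joins: it scans the raw string with str.find for the dot separator, collects the ever-shorter suffix substrings in one pass, and reverses the collected list at the end.
import Mathlib
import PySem

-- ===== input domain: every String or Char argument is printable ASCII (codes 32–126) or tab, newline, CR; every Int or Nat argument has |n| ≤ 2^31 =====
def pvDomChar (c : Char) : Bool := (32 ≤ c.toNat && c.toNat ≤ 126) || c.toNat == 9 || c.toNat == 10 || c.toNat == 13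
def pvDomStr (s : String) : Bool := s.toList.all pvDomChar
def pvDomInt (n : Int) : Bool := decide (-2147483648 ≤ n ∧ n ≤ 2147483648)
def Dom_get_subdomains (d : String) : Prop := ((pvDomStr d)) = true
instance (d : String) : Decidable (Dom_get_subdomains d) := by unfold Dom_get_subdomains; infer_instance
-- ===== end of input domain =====

-- B scans the raw string for '.' with find and collects ever-shorter suffix substrings back-to-front (then reverses), instead of A's split-into-parts list with insert-at-front and a full re-join on every iteration.


-- ===== PORT A =====
-- d.split('.') : separator is nonempty, so split? always returns some.
-- domains[len(domains)-1-i] : the index is always in range for i in range(len(domains)),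
-- so pyGetD with a default transcribes the (never-raising) subscript exactly.
def get_subdomains (d : String) : List String :=
  let domains := (PySem.Str.split? d ".").getD []
  let n : Int := PySem.List.len domains
  ((PySem.List.pyRange 0 n 1).foldl (fun (st : List String × List String) i =>
      let last_elem := PySem.List.insert st.2 0 (PySem.List.pyGetD domains (n - 1 - i) "")
      let sd := if 1 < last_elem.length then PySem.Str.join "." last_elem
                else PySem.Str.join "" last_elem
      (st.1 ++ [sd], last_elem)) ([], [])).1

-- ===== PORT B =====
-- The while loop of Source B: 'res.append(rest); i = rest.find('.'); if i == -1: break; rest = rest[i+1:]'.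
-- Carried on the code points (PySem.Chars.find / PySem.List.slice are the exact Str primitives);
-- terminates because rest[i+1:] is strictly shorter whenever find succeeds.
def pvGoB (rest : List Char) (res : List (List Char)) : List (List Char) :=
  let res' := res ++ [rest]
  let i := PySem.Chars.find rest ['.']
  if h : i = -1 then res'
  else pvGoB (PySem.List.slice rest (some (i + 1)) none) res'
termination_by rest.length
decreasing_by
  have h0 : 0 ≤ PySem.Chars.find rest ['.'] := by
    have := PySem.Chars.neg_one_le_find rest ['.']
    omega
  have hinf : ['.'] <:+: rest := (PySem.Chars.find_nonneg_iff rest ['.']).mp h0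
  have hne : rest ≠ [] := by
    rintro rfl
    simpa using hinf.sublist.length_le
  rw [PySem.List.slice_from _ (show (0:Int) ≤ PySem.Chars.find rest ['.'] + 1 by omega)]
  have : rest.length ≠ 0 := fun hh => hne (List.eq_nil_of_length_eq_zero hh)
  simp only [List.length_drop]
  omega

-- 'res.reverse(); return res' — the .map String.ofList only re-wraps the code-point lists as Strings.
def get_subdomains_alt (d : String) : List String :=
  (pvGoB d.toList []).reverse.map String.ofList

-- ===== PRECONDITION & SPEC =====
def Spec_get_subdomains (d : String) (out : List String) : Prop := out = get_subdomains_alt d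
instance (d : String) (out : List String) : Decidable (Spec_get_subdomains d out) := by unfold Spec_get_subdomains; infer_instance

-- ===== CLAIM (what is proved, stated in full; the proofs are below) =====
def Claim_equal_get_subdomains : Prop := ∀ (d : String), Dom_get_subdomains d → Spec_get_subdomains d (get_subdomains d)

-- ===== LEMMAS AND PROOFS =====

-- Structural (per-character) form of splitting on '.'.
def pvParts : List Char → List (List Char)
  | [] => [[]]
  | c :: t =>
    match pvParts t with
    | [] => []
    | p :: ps => if c = '.' then [] :: p :: ps else (c :: p) :: ps

theorem pvParts_ne_nil (s : List Char) : pvParts s ≠ [] := by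
  induction s with
  | nil => simp [pvParts]
  | cons c t ih =>
    cases hp : pvParts t with
    | nil => exact absurd hp ih
    | cons p ps => simp [pvParts, hp]; split_ifs <;> simp

theorem splitOn_go_spec (l : List Char) : ∀ (fuel : Nat) (cur : List Char) (acc : List (List Char)),
    l.length < fuel →
    PySem.Chars.splitOn.go ['.'] fuel l cur acc
      = acc.reverse ++ (match pvParts l with
          | [] => []
          | p :: ps => (cur.reverse ++ p) :: ps) := by
  induction l with
  | nil =>
    intro fuel cur acc hf
    cases fuel with
    | zero => omega
    | succ f => simp [PySem.Chars.splitOn.go, pvParts]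
  | cons c t ih =>
    intro fuel cur acc hf
    cases fuel with
    | zero => omega
    | succ f =>
      have hlen : t.length < f := by simpa using hf
      by_cases hc : c = '.'
      · subst hc
        rw [show PySem.Chars.splitOn.go ['.'] (f + 1) ('.' :: t) cur acc
              = PySem.Chars.splitOn.go ['.'] f t [] (cur.reverse :: acc) from by
            simp [PySem.Chars.splitOn.go, List.isPrefixOf]]
        rw [ih f [] (cur.reverse :: acc) hlen]
        cases hp : pvParts t with
        | nil => exact absurd hp (pvParts_ne_nil t)
        | cons p ps => simp [pvParts, hp]
      · rw [show PySem.Chars.splitOn.go ['.'] (f + 1) (c :: t) cur acc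
              = PySem.Chars.splitOn.go ['.'] f t (c :: cur) acc from by
            simp [PySem.Chars.splitOn.go, List.isPrefixOf]
            intro h; exact absurd h.symm hc]
        rw [ih f (c :: cur) acc hlen]
        cases hp : pvParts t with
        | nil => exact absurd hp (pvParts_ne_nil t)
        | cons p ps => simp [pvParts, hp, hc]

theorem splitOn_eq_pvParts (s : List Char) : PySem.Chars.splitOn s ['.'] = pvParts s := by
  rw [PySem.Chars.splitOn]
  rw [splitOn_go_spec s (s.length + 1) [] [] (by omega)]
  cases hp : pvParts s with
  | nil => exact absurd hp (pvParts_ne_nil s)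
  | cons p ps => simp

-- ---- find on a single-char separator: first-occurrence recurrence ----

theorem pvFind_cons (c : Char) (t : List Char) :
    PySem.Chars.find (c :: t) ['.'] =
      if c = '.' then 0
      else if PySem.Chars.find t ['.'] = -1 then -1 else PySem.Chars.find t ['.'] + 1 := by
  by_cases hc : c = '.'
  · subst hc
    rw [if_pos rfl]
    have hpre : ['.'] <+: '.' :: t := ⟨t, rfl⟩
    have h0 : 0 ≤ PySem.Chars.find ('.' :: t) ['.'] :=
      (PySem.Chars.find_nonneg_iff _ _).mpr hpre.isInfix
    obtain ⟨h1, h2⟩ := PySem.Chars.find_spec h0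
    by_cases hk : (PySem.Chars.find ('.' :: t) ['.']).toNat = 0
    · omega
    · have := h2 0 (by omega)
      rw [List.drop_zero] at this
      exact absurd hpre this
  · rw [if_neg hc]
    by_cases hft : PySem.Chars.find t ['.'] = -1
    · rw [if_pos hft]
      rw [PySem.Chars.find_eq_neg_one_iff] at hft ⊢
      intro hinf
      rcases List.infix_cons_iff.mp hinf with hp | hi
      · exact hc (List.cons_prefix_cons.mp hp).1.symm
      · exact hft hi
    · rw [if_neg hft]
      have h0t : 0 ≤ PySem.Chars.find t ['.'] := by
        have := PySem.Chars.neg_one_le_find t ['.']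
        omega
      obtain ⟨ht1, ht2⟩ := PySem.Chars.find_spec h0t
      have hwit : ['.'] <+: (c :: t).drop ((PySem.Chars.find t ['.']).toNat + 1) := by
        simpa using ht1
      have h0s : 0 ≤ PySem.Chars.find (c :: t) ['.'] := by
        rw [PySem.Chars.find_nonneg_iff]
        exact hwit.isInfix.trans (List.drop_suffix _ _).isInfix
      obtain ⟨hs1, hs2⟩ := PySem.Chars.find_spec h0s
      generalize hm : (PySem.Chars.find t ['.']).toNat = m at ht1 ht2 hwit
      generalize hk : (PySem.Chars.find (c :: t) ['.']).toNat = k at hs1 hs2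
      have hkle : k ≤ m + 1 := by
        by_contra hgt
        exact hs2 (m + 1) (by omega) hwit
      have hkpos : k ≠ 0 := by
        rintro rfl
        rw [List.drop_zero] at hs1
        exact hc (List.cons_prefix_cons.mp hs1).1.symm
      have hkge : m + 1 ≤ k := by
        by_contra hlt
        obtain ⟨j, rfl⟩ : ∃ j, k = j + 1 := ⟨k - 1, by omega⟩
        rw [List.drop_succ_cons] at hs1
        exact ht2 j (by omega) hs1
      omega

theorem pvFind_nil : PySem.Chars.find [] ['.'] = -1 := by decide

-- ---- pvParts is the split, characterised by the first dot ----

theorem pvParts_no_dot (s : List Char) (h : PySem.Chars.find s ['.'] = -1) :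
    pvParts s = [s] := by
  induction s with
  | nil => rfl
  | cons c t ih =>
    rw [pvFind_cons] at h
    by_cases hc : c = '.'
    · rw [if_pos hc] at h; exact absurd h (by norm_num)
    · rw [if_neg hc] at h
      by_cases hft : PySem.Chars.find t ['.'] = -1
      · simp [pvParts, ih hft, hc]
      · rw [if_neg hft] at h
        have := PySem.Chars.neg_one_le_find t ['.']
        omega

theorem pvParts_dot (s : List Char) (k : Nat)
    (h : PySem.Chars.find s ['.'] = (k : Int)) :
    pvParts s = s.take k :: pvParts (s.drop (k + 1)) := by
  induction s generalizing k with
  | nil => rw [pvFind_nil] at h; omega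
  | cons c t ih =>
    rw [pvFind_cons] at h
    by_cases hc : c = '.'
    · subst hc
      rw [if_pos rfl] at h
      have hk0 : k = 0 := by omega
      subst hk0
      cases hp : pvParts t with
      | nil => exact absurd hp (pvParts_ne_nil t)
      | cons p ps => simp [pvParts, hp]
    · rw [if_neg hc] at h
      by_cases hft : PySem.Chars.find t ['.'] = -1
      · rw [if_pos hft] at h; omega
      · rw [if_neg hft] at h
        have h0t : 0 ≤ PySem.Chars.find t ['.'] := by
          have := PySem.Chars.neg_one_le_find t ['.']
          omega
        have hkpos : 1 ≤ k := by omega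
        have hft' : PySem.Chars.find t ['.'] = ((k - 1 : Nat) : Int) := by omega
        have hpt := ih (k - 1) hft'
        have h1 : (c :: t).take k = c :: t.take (k - 1) := by
          obtain ⟨k', rfl⟩ : ∃ k', k = k' + 1 := ⟨k - 1, by omega⟩
          simp
        have h2 : (c :: t).drop (k + 1) = t.drop (k - 1 + 1) := by
          obtain ⟨k', rfl⟩ : ∃ k', k = k' + 1 := ⟨k - 1, by omega⟩
          simp [List.drop_succ_cons]
        rw [h1, h2]
        simp [pvParts, hpt, hc]
  -- ---- join of the parts restores the string ----

theorem pvJoin_parts (s : List Char) :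
    PySem.Chars.join ['.'] (pvParts s) = s := by
  induction s with
  | nil => simp [pvParts, PySem.Chars.join_singleton]
  | cons c t ih =>
    cases hp : pvParts t with
    | nil => exact absurd hp (pvParts_ne_nil t)
    | cons p ps =>
      rw [hp] at ih
      by_cases hc : c = '.'
      · subst hc
        rw [show pvParts ('.' :: t) = [] :: p :: ps from by simp [pvParts, hp]]
        rw [PySem.Chars.join_cons_cons]
        simpa using ih
      · simp only [pvParts, hp, if_neg hc]
        cases ps with
        | nil =>
          rw [PySem.Chars.join_singleton] at ih ⊢
          simp [ih]
        | cons q qs =>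
          rw [PySem.Chars.join_cons_cons] at ih ⊢
          simp [← ih]

-- ---- A's loop, after reversal, is pvKA; pvKA reversed is the suffix-join list pvHJ ----

def pvKA : List String → List String → List String
  | [], _ => []
  | p :: m, le =>
    (if 1 < (p :: le).length then PySem.Str.join "." (p :: le)
     else PySem.Str.join "" (p :: le)) :: pvKA m (p :: le)

def pvHJ : List String → List String
  | [] => []
  | p :: t => pvHJ t ++ [if t.isEmpty then p else PySem.Str.join "." (p :: t)]

theorem pvA_fold (m : List String) : ∀ (out le : List String),
    (m.foldl (fun (st : List String × List String) p =>
        let last_elem := PySem.List.insert st.2 0 p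
        let sd := if 1 < last_elem.length then PySem.Str.join "." last_elem
                  else PySem.Str.join "" last_elem
        (st.1 ++ [sd], last_elem)) (out, le)).1 = out ++ pvKA m le := by
  induction m with
  | nil => intro out le; simp [pvKA]
  | cons p m ih =>
    intro out le
    rw [List.foldl_cons]
    rw [show (let last_elem := PySem.List.insert ((out, le) : List String × List String).2 0 p
              let sd := if 1 < last_elem.length then PySem.Str.join "." last_elem
                        else PySem.Str.join "" last_elem
              (((out, le) : List String × List String).1 ++ [sd], last_elem))
        = ((out ++ [if 1 < (p :: le).length then PySem.Str.join "." (p :: le)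
                   else PySem.Str.join "" (p :: le)], p :: le) : List String × List String) from by
        simp [PySem.List.insert_zero]]
    rw [ih]
    simp [pvKA]

theorem pvKA_append (m m' : List String) : ∀ le,
    pvKA (m ++ m') le = pvKA m le ++ pvKA m' (m.reverse ++ le) := by
  induction m with
  | nil => intro le; simp [pvKA]
  | cons p m ih =>
    intro le
    simp only [List.cons_append, pvKA, ih (p :: le)]
    simp

theorem pvJoin_one (sep p : String) : PySem.Str.join sep [p] = p := by
  apply String.toList_inj.mp
  rw [PySem.Str.toList_join]
  simp [PySem.Chars.join_singleton]

theorem pvKA_rev (l : List String) : pvKA l.reverse [] = pvHJ l := by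
  induction l with
  | nil => rfl
  | cons p t ih =>
    rw [List.reverse_cons, pvKA_append, ih]
    simp only [List.reverse_reverse, List.append_nil, pvHJ]
    congr 1
    cases t with
    | nil => simp [pvKA, pvJoin_one]
    | cons q qs => simp [pvKA]

-- ---- B's loop: accumulator form and the main characterisation ----

theorem pvGoB_acc : ∀ (n : Nat) (s : List Char), s.length ≤ n →
    ∀ res, pvGoB s res = res ++ pvGoB s [] := by
  intro n
  induction n with
  | zero =>
    intro s hs res
    have : s = [] := List.eq_nil_of_length_eq_zero (by omega)
    subst this
    conv_lhs => rw [pvGoB]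
    conv_rhs => rw [pvGoB]
    simp [pvFind_nil]
  | succ n ih =>
    intro s hs res
    conv_lhs => rw [pvGoB]
    conv_rhs => rw [pvGoB]
    by_cases hf : PySem.Chars.find s ['.'] = -1
    · simp [hf]
    · simp only [hf, dite_false]
      have h0 : 0 ≤ PySem.Chars.find s ['.'] := by
        have := PySem.Chars.neg_one_le_find s ['.']
        omega
      have hne : s ≠ [] := by
        intro h; subst h; exact hf pvFind_nil
      rw [PySem.List.slice_from _ (show (0:Int) ≤ PySem.Chars.find s ['.'] + 1 by omega)]
      have hlen : (s.drop (PySem.Chars.find s ['.'] + 1).toNat).length ≤ n := by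
        have hne' : s.length ≠ 0 := fun hh => hne (List.eq_nil_of_length_eq_zero hh)
        simp only [List.length_drop]
        omega
      rw [ih _ hlen (res ++ [s]), ih _ hlen ([] ++ [s])]
      simp

theorem pvMain : ∀ (n : Nat) (s : List Char), s.length ≤ n →
    (pvGoB s []).reverse.map String.ofList = pvHJ ((pvParts s).map String.ofList) := by
  intro n
  induction n with
  | zero =>
    intro s hs
    have : s = [] := List.eq_nil_of_length_eq_zero (by omega)
    subst this
    rw [pvGoB]
    simp [pvFind_nil, pvParts, pvHJ]
  | succ n ih =>
    intro s hs
    by_cases hf : PySem.Chars.find s ['.'] = -1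
    · rw [pvGoB]
      simp only [hf, List.nil_append]
      rw [pvParts_no_dot s hf]
      simp [pvHJ]
    · have h0 : 0 ≤ PySem.Chars.find s ['.'] := by
        have := PySem.Chars.neg_one_le_find s ['.']
        omega
      set k : Nat := (PySem.Chars.find s ['.']).toNat with hk
      have hfk : PySem.Chars.find s ['.'] = (k : Int) := by omega
      have hklt : k < s.length := by
        obtain ⟨h1, _⟩ := PySem.Chars.find_spec h0
        have hne : s.drop k ≠ [] := by
          intro hd
          rw [← hk, hd] at h1
          simpa using h1.length_le
        have := List.length_drop (l := s) (i := k)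
        by_contra hge
        exact hne (List.drop_eq_nil_of_le (by omega))
      rw [pvGoB]
      simp only [hf]
      rw [PySem.List.slice_from _ (show (0:Int) ≤ PySem.Chars.find s ['.'] + 1 by omega)]
      have htn : (PySem.Chars.find s ['.'] + 1).toNat = k + 1 := by omega
      rw [htn]
      have hlen : (s.drop (k + 1)).length ≤ n := by
        simp only [List.length_drop]; omega
      rw [pvGoB_acc n _ hlen ([] ++ [s])]
      rw [pvParts_dot s k hfk]
      have hmapne : (pvParts (s.drop (k + 1))).map String.ofList ≠ [] := by
        intro hh
        exact pvParts_ne_nil _ (List.map_eq_nil_iff.mp hh)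
      simp only [List.map_cons, pvHJ]
      rw [← ih _ hlen]
      have hjoin : (if ((pvParts (s.drop (k + 1))).map String.ofList).isEmpty then
            String.ofList (s.take k)
          else PySem.Str.join "."
            (String.ofList (s.take k) :: (pvParts (s.drop (k + 1))).map String.ofList))
          = String.ofList s := by
        rw [if_neg (by simpa [List.isEmpty_iff] using hmapne)]
        apply String.toList_inj.mp
        rw [PySem.Str.toList_join]
        have : (String.ofList (s.take k) :: (pvParts (s.drop (k + 1))).map String.ofList).map
            String.toList = s.take k :: pvParts (s.drop (k + 1)) := by
          simp [List.map_map, Function.comp_def]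
        rw [this]
        have := pvJoin_parts s
        rw [pvParts_dot s k hfk] at this
        simpa using this
      rw [hjoin]
      simp

-- ---- A's indexing loop is a fold over the reversed parts ----

theorem pyGetD_rev_index {α : Type} (xs : List α) (d : α) (j : Int)
    (h0 : 0 ≤ j) (h1 : j < PySem.List.len xs) :
    PySem.List.pyGetD xs (PySem.List.len xs - 1 - j) d = PySem.List.pyGetD xs.reverse j d := by
  have hlen : PySem.List.len xs = (xs.length : Int) := by simp [pysem]
  have hj : j = (j.toNat : Int) := (Int.toNat_of_nonneg h0).symm
  have hjl : j.toNat < xs.length := by omega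
  have hi : PySem.List.len xs - 1 - j = ((xs.length - 1 - j.toNat : Nat) : Int) := by omega
  rw [hi, hj, PySem.List.pyGetD_natCast, PySem.List.pyGetD_natCast]
  rw [List.getD_eq_getElem?_getD, List.getD_eq_getElem?_getD]
  rw [List.getElem?_eq_getElem (by omega), List.getElem?_eq_getElem (by simpa using hjl)]
  simp [List.getElem_reverse]
  congr 1
  omega

theorem foldl_range_rev {α β : Type} (xs : List α) (d : α) (g : β → α → β) (init : β) :
    (PySem.List.pyRange 0 (PySem.List.len xs) 1).foldl
        (fun acc i => g acc (PySem.List.pyGetD xs (PySem.List.len xs - 1 - i) d)) init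
      = xs.reverse.foldl g init := by
  have hcongr : ∀ (acc : β), ∀ i ∈ PySem.List.pyRange 0 (PySem.List.len xs) 1,
      g acc (PySem.List.pyGetD xs (PySem.List.len xs - 1 - i) d)
        = g acc (PySem.List.pyGetD xs.reverse i d) := by
    intro acc i hi
    rw [PySem.List.mem_pyRange_one] at hi
    rw [pyGetD_rev_index xs d i hi.1 hi.2]
  rw [PySem.List.foldl_congr_mem _ _ _ _ hcongr]
  have hlen : PySem.List.len xs = PySem.List.len xs.reverse := by simp [pysem]
  rw [hlen]
  exact PySem.List.foldl_pyRange_zero_pyGetD xs.reverse d g init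

-- ===== VERDICT (by name: the statement is the Claim_ definition above) =====
theorem get_subdomains_spec : Claim_equal_get_subdomains := by
  intro d _
  unfold Spec_get_subdomains get_subdomains get_subdomains_alt
  simp only []
  have hsplit : (PySem.Str.split? d ".").getD []
      = (pvParts d.toList).map String.ofList := by
    rw [PySem.Str.split?, PySem.Chars.split?]
    simp [splitOn_eq_pvParts]
  rw [foldl_range_rev ((PySem.Str.split? d ".").getD []) ""
      (fun (st : List String × List String) p =>
        let last_elem := PySem.List.insert st.2 0 p
        let sd := if 1 < last_elem.length then PySem.Str.join "." last_elem
                  else PySem.Str.join "" last_elem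
        (st.1 ++ [sd], last_elem)) ([], [])]
  rw [show (([], []) : List String × List String) = (([] : List String), ([] : List String)) from rfl]
  rw [pvA_fold, pvKA_rev, hsplit]
  rw [← pvMain d.toList.length d.toList (le_refl _)]
  simp
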